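-- pv_equiv track=rewrite | github.com/ChrisWDurand/preambulate | preambulate/cluster.py | _label_propagation
-- ===== SOURCE A (Python) =====
-- from collections import defaultdict
--
-- MAX_ITER   = 50
--
-- def _label_propagation(nodes: list[str], edges: list[tuple[str, str]]) -> dict[str, str]:
--     """
--     Assign each node a cluster label via label propagation.
--     Returns {node_path: label_string}.
--     """
--     if not nodes:
--         return {}
--
--     # Build undirected adjacency
--     adj: dict[str, set[str]] = defaultdict(set)
--     for a, b in edges:
--         if a in set(nodes) and b in set(nodes):
--             adj[a].add(b)
--             adj[b].add(a)
--
--     # Initialise: each node is its own label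
--     labels: dict[str, str] = {n: n for n in nodes}
--
--     for _ in range(MAX_ITER):
--         changed = False
--         for node in nodes:
--             neighbors = adj[node]
--             if not neighbors:
--                 continue
--             # Count neighbor labels
--             counts: dict[str, int] = defaultdict(int)
--             for nb in neighbors:
--                 counts[labels[nb]] += 1
--             # Most common label (tie-break: lexicographic minimum)
--             best = min(counts, key=lambda lbl: (-counts[lbl], lbl))
--             if best != labels[node]:
--                 labels[node] = best
--                 changed = True
--         if not changed:
--             break
--
--     return labels
-- ===== SOURCE B (Python) =====
-- from collections import defaultdict
--
-- MAX_ITER = 50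
--
-- def _label_propagation(nodes: list[str], edges: list[tuple[str, str]]) -> dict[str, str]:
--     """
--     Assign each node a cluster label via label propagation.
--     Returns {node_path: label_string}.
--     """
--     if not nodes:
--         return {}
--
--     # Build undirected adjacency as deduplicated neighbour lists
--     # (node-set membership computed once, not per edge)
--     nodeset = set(nodes)
--     adj: dict[str, list[str]] = defaultdict(list)
--     for a, b in edges:
--         if a in nodeset and b in nodeset:
--             if b not in adj[a]:
--                 adj[a].append(b)
--             if a not in adj[b]:
--                 adj[b].append(a)
--
--     labels: dict[str, str] = {n: n for n in nodes}
--
--     for _ in range(MAX_ITER):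
--         changed = False
--         for node in nodes:
--             nbs = adj[node]
--             if not nbs:
--                 continue
--             # Most common neighbour label, smallest lexicographically on ties:
--             # sort the neighbour labels and scan the runs, keeping the first
--             # strictly longest run seen.
--             run = sorted(labels[nb] for nb in nbs)
--             best, best_cnt = run[0], 1
--             cur, cur_cnt = run[0], 1
--             for lbl in run[1:]:
--                 if lbl == cur:
--                     cur_cnt += 1
--                 else:
--                     cur, cur_cnt = lbl, 1
--                 if cur_cnt > best_cnt:
--                     best, best_cnt = cur, cur_cnt
--             if best != labels[node]:
--                 labels[node] = best
--                 changed = True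
--         if not changed:
--             break
--
--     return labels
-- ===== Notes on version B (the rewrite author's own statement) =====
-- stated objective: faster
-- what changed: Per node, B replaces A's count-dict plus min(counts, key=(-count,label)) by sorting the neighbour labels and scanning runs, keeping the first strictly-longest run; B also builds set(nodes) once instead of rebuilding it twice per edge, and keeps deduplicated neighbour lists instead of sets.
import Mathlib
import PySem

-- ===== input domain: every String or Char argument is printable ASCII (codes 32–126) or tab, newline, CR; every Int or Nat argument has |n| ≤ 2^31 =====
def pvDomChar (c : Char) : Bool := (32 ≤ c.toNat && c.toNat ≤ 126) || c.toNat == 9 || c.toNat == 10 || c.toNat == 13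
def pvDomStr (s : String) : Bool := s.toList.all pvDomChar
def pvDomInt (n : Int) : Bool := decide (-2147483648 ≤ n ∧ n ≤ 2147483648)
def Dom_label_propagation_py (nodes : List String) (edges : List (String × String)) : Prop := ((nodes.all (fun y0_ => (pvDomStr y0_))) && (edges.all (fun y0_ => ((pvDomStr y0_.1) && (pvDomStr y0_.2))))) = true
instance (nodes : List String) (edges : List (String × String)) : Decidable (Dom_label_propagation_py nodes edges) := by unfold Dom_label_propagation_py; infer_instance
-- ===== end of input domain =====

-- B replaces A's per-node count-dict + min(key=(-count,label)) by sorting the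
-- neighbour labels and scanning runs (and hoists set(nodes) out of the edge
-- loop); same return value (A mutates nothing observable).

-- ===== PORT A =====
-- A's per-node choice: counts = defaultdict(int) over neighbour labels, then
-- min(counts, key=lambda lbl: (-counts[lbl], lbl)).
-- labels[nb] / labels[node] are ported as getD with default "": every
-- neighbour is a member of nodes, hence a key of labels, so the default is
-- never used (Python raises no KeyError here).
def pvBestA (labels : PySem.Dict String String) (neighbors : PySem.Set String) : String :=
  let counts : PySem.Dict String Int :=
    neighbors.foldl (fun d nb => d.modify (labels.getD nb "") 0 (· + 1)) PySem.Dict.empty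
  (PySem.List.min2? counts.keys (fun lbl => -(counts.getD lbl 0)) (fun lbl => lbl)).getD ""

-- one step of A's inner `for node in nodes` loop; state = (labels, changed).
-- adj[node] on the defaultdict inserts an empty set for a missing key, which
-- is observationally the same as getD with the empty-set default (the dict
-- adj is never output).
def pvStepA (adj : PySem.Dict String (PySem.Set String))
    (st : PySem.Dict String String × Bool) (node : String) :
    PySem.Dict String String × Bool :=
  let neighbors := adj.getD node PySem.Set.empty
  if neighbors = [] then st
  else
    let best := pvBestA st.1 neighbors
    if best ≠ st.1.getD node "" then (st.1.insert node best, true) else st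

-- `for _ in range(MAX_ITER)` with the `if not changed: break` early exit
def pvLoopA (nodes : List String) (adj : PySem.Dict String (PySem.Set String)) :
    Nat → PySem.Dict String String → PySem.Dict String String
  | 0, labels => labels
  | fuel + 1, labels =>
    let st := nodes.foldl (pvStepA adj) (labels, false)
    if st.2 then pvLoopA nodes adj fuel st.1 else st.1

def label_propagation_py (nodes : List String) (edges : List (String × String)) : List (String × String) :=
  if nodes = [] then []
  else
    let adj : PySem.Dict String (PySem.Set String) :=
      edges.foldl (fun adj ab =>
        if (PySem.Set.ofList nodes).contains ab.1 && (PySem.Set.ofList nodes).contains ab.2 then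
          let adj1 := adj.modify ab.1 PySem.Set.empty (fun s => PySem.Set.add s ab.2)
          adj1.modify ab.2 PySem.Set.empty (fun s => PySem.Set.add s ab.1)
        else adj) PySem.Dict.empty
    let labels0 := nodes.foldl (fun d n => d.insert n n) PySem.Dict.empty
    (pvLoopA nodes adj 50 labels0).items

-- ===== PORT B =====
-- B's run scan: state = (best, best_cnt, cur, cur_cnt)
def pvRunStep (st : String × Nat × String × Nat) (lbl : String) : String × Nat × String × Nat :=
  let best := st.1
  let bestCnt := st.2.1
  let cur := if lbl = st.2.2.1 then st.2.2.1 else lbl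
  let curCnt := if lbl = st.2.2.1 then st.2.2.2 + 1 else 1
  if bestCnt < curCnt then (cur, curCnt, cur, curCnt) else (best, bestCnt, cur, curCnt)

-- sorted neighbour labels; run[0] starts the scan (callers guard nbs ≠ [],
-- so the [] branch is unreachable)
def pvBestB (labels : PySem.Dict String String) (nbs : List String) : String :=
  match PySem.List.sorted (nbs.map fun nb => labels.getD nb "") (fun x => x) false with
  | [] => ""
  | h :: t => (t.foldl pvRunStep (h, 1, h, 1)).1

def pvStepB (adj : PySem.Dict String (List String))
    (st : PySem.Dict String String × Bool) (node : String) :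
    PySem.Dict String String × Bool :=
  let nbs := adj.getD node []
  if nbs = [] then st
  else
    let best := pvBestB st.1 nbs
    if best ≠ st.1.getD node "" then (st.1.insert node best, true) else st

def pvLoopB (nodes : List String) (adj : PySem.Dict String (List String)) :
    Nat → PySem.Dict String String → PySem.Dict String String
  | 0, labels => labels
  | fuel + 1, labels =>
    let st := nodes.foldl (pvStepB adj) (labels, false)
    if st.2 then pvLoopB nodes adj fuel st.1 else st.1

def label_propagation_py_alt (nodes : List String) (edges : List (String × String)) : List (String × String) :=
  if nodes = [] then []
  else
    let nodeset := PySem.Set.ofList nodes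
    let adj : PySem.Dict String (List String) :=
      edges.foldl (fun adj ab =>
        if nodeset.contains ab.1 && nodeset.contains ab.2 then
          let adj1 := adj.modify ab.1 [] (fun l => if l.contains ab.2 then l else l ++ [ab.2])
          adj1.modify ab.2 [] (fun l => if l.contains ab.1 then l else l ++ [ab.1])
        else adj) PySem.Dict.empty
    let labels0 := nodes.foldl (fun d n => d.insert n n) PySem.Dict.empty
    (pvLoopB nodes adj 50 labels0).items

-- ===== PRECONDITION & SPEC =====
def Spec_label_propagation_py (nodes : List String) (edges : List (String × String)) (out : List (String × String)) : Prop := out = label_propagation_py_alt nodes edges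
instance (nodes : List String) (edges : List (String × String)) (out : List (String × String)) : Decidable (Spec_label_propagation_py nodes edges out) := by unfold Spec_label_propagation_py; infer_instance

-- ===== CLAIM (what is proved, stated in full; the proofs are below) =====
def Claim_equal_label_propagation_py : Prop := ∀ (nodes : List String) (edges : List (String × String)), Dom_label_propagation_py nodes edges → Spec_label_propagation_py nodes edges (label_propagation_py nodes edges)

-- ===== LEMMAS AND PROOFS =====

def pvIsBest (L : List String) (r : String) : Prop :=
  r ∈ L ∧ ∀ y ∈ L, L.count y < L.count r ∨ (L.count y = L.count r ∧ r ≤ y)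

lemma pvIsBest_unique {L : List String} {r₁ r₂ : String}
    (h₁ : pvIsBest L r₁) (h₂ : pvIsBest L r₂) : r₁ = r₂ := by
  obtain ⟨m₁, s₁⟩ := h₁
  obtain ⟨m₂, s₂⟩ := h₂
  rcases s₁ r₂ m₂ with h | ⟨hc, hle⟩ <;> rcases s₂ r₁ m₁ with h' | ⟨hc', hle'⟩
  · omega
  · omega
  · omega
  · exact le_antisymm hle hle'

def pvRel (c : String → Int) (u v : String) : Prop := c u < c v ∨ (c u = c v ∧ u ≤ v)

lemma pvRel_refl (c : String → Int) (a : String) : pvRel c a a := Or.inr ⟨rfl, le_refl _⟩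

lemma pvRel_trans {c : String → Int} {a b d : String}
    (h₁ : pvRel c a b) (h₂ : pvRel c b d) : pvRel c a d := by
  rcases h₁ with h | ⟨h, hl⟩ <;> rcases h₂ with h' | ⟨h', hl'⟩
  · exact Or.inl (by omega)
  · exact Or.inl (by omega)
  · exact Or.inl (by omega)
  · exact Or.inr ⟨by omega, le_trans hl hl'⟩

lemma pv_fold_generic (c : String → Int) (f : Option String → String → Option String)
    (hf : ∀ a x, (f (some a) x = some x ∧ pvRel c x a) ∨ (f (some a) x = some a ∧ pvRel c a x)) :
    ∀ (t : List String) (a m : String), List.foldl f (some a) t = some m →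
      (m = a ∨ m ∈ t) ∧ pvRel c m a ∧ ∀ y ∈ t, pvRel c m y := by
  intro t
  induction t with
  | nil =>
    intro a m h
    simp only [List.foldl_nil, Option.some.injEq] at h; subst h
    exact ⟨Or.inl rfl, pvRel_refl c _, by simp⟩
  | cons x t ih =>
    intro a m h
    rw [List.foldl_cons] at h
    rcases hf a x with ⟨he, hr⟩ | ⟨he, hr⟩ <;> rw [he] at h
    · obtain ⟨hm, hra, hall⟩ := ih x m h
      refine ⟨?_, pvRel_trans hra hr, fun y hy => ?_⟩
      · rcases hm with rfl | hm
        · exact Or.inr List.mem_cons_self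
        · exact Or.inr (List.mem_cons_of_mem _ hm)
      · rcases List.mem_cons.mp hy with rfl | hy
        · exact hra
        · exact hall y hy
    · obtain ⟨hm, hra, hall⟩ := ih a m h
      refine ⟨?_, hra, fun y hy => ?_⟩
      · rcases hm with rfl | hm
        · exact Or.inl rfl
        · exact Or.inr (List.mem_cons_of_mem _ hm)
      · rcases List.mem_cons.mp hy with rfl | hy
        · exact pvRel_trans hra hr
        · exact hall y hy

lemma pv_fold_some (f : Option String → String → Option String)
    (hf : ∀ a x, f (some a) x = some x ∨ f (some a) x = some a) :
    ∀ (t : List String) (a : String), ∃ m, List.foldl f (some a) t = some m := by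
  intro t
  induction t with
  | nil => exact fun a => ⟨a, rfl⟩
  | cons x t ih =>
    intro a
    rw [List.foldl_cons]
    rcases hf a x with he | he <;> rw [he]
    · exact ih x
    · exact ih a

lemma pv_min2_step (c : String → Int) (a x : String) :
    ((fun (acc : Option String) (x : String) =>
      match acc with
      | none => some x
      | some m =>
        if (decide (c x < c m) || !decide (c m < c x) && decide (x < m)) = true
        then some x else some m) (some a) x = some x ∧ pvRel c x a) ∨
    ((fun (acc : Option String) (x : String) =>
      match acc with
      | none => some x
      | some m =>
        if (decide (c x < c m) || !decide (c m < c x) && decide (x < m)) = true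
        then some x else some m) (some a) x = some a ∧ pvRel c a x) := by
  by_cases hc : (decide (c x < c a) || !decide (c a < c x) && decide (x < a)) = true
  · refine Or.inl ⟨by simp only [hc, if_pos], ?_⟩
    simp only [Bool.or_eq_true, Bool.and_eq_true, Bool.not_eq_true', decide_eq_true_eq,
      decide_eq_false_iff_not] at hc
    rcases hc with h1 | ⟨h1, h2⟩
    · exact Or.inl h1
    · by_cases h3 : c x < c a
      · exact Or.inl h3
      · exact Or.inr ⟨by omega, le_of_lt h2⟩
  · refine Or.inr ⟨by simp only [hc, if_neg, Bool.false_eq_true, not_false_iff], ?_⟩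
    have hA : ¬ c x < c a := fun hx => hc (by simp [hx])
    by_cases h3 : c a < c x
    · exact Or.inl h3
    · have h4 : ¬ x < a := fun hx => hc (by simp [h3, hx])
      exact Or.inr ⟨by omega, not_lt.mp h4⟩

lemma pv_min2_spec (c : String → Int) (xs : List String) (m : String)
    (h : PySem.List.min2? xs c (fun lbl => lbl) = some m) :
    m ∈ xs ∧ ∀ y ∈ xs, pvRel c m y := by
  cases xs with
  | nil => simp [PySem.List.min2?] at h
  | cons x t =>
    unfold PySem.List.min2? at h
    rw [List.foldl_cons] at h
    obtain ⟨hm, hra, hall⟩ := pv_fold_generic c _ (pv_min2_step c) t x m h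
    refine ⟨?_, fun y hy => ?_⟩
    · rcases hm with rfl | hm
      · exact List.mem_cons_self
      · exact List.mem_cons_of_mem _ hm
    · rcases List.mem_cons.mp hy with rfl | hy
      · exact hra
      · exact hall y hy

lemma pv_min2_isSome (c : String → Int) (xs : List String) (hx : xs ≠ []) :
    ∃ m, PySem.List.min2? xs c (fun lbl => lbl) = some m := by
  cases xs with
  | nil => exact absurd rfl hx
  | cons x t =>
    unfold PySem.List.min2?
    rw [List.foldl_cons]
    exact pv_fold_some _ (fun a z => by
      rcases pv_min2_step c a z with ⟨he, _⟩ | ⟨he, _⟩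
      · exact Or.inl he
      · exact Or.inr he) t x

lemma pv_scan (R : List String) :
    ∀ (P : List String) (best cur : String) (bestCnt curCnt : Nat),
      (P ++ R).Pairwise (· ≤ ·) →
      cur ∈ P → (∀ y ∈ P, y ≤ cur) → curCnt = P.count cur →
      best ∈ P → bestCnt = P.count best →
      (∀ y ∈ P, P.count y < bestCnt ∨ (P.count y = bestCnt ∧ best ≤ y)) →
      pvIsBest (P ++ R) (R.foldl pvRunStep (best, bestCnt, cur, curCnt)).1 := by
  induction R with
  | nil =>
    intro P best cur bestCnt curCnt hpw hcm hcmax hcc hbm hbc hspec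
    simp only [List.foldl_nil, List.append_nil]
    exact ⟨hbm, fun y hy => by rcases hspec y hy with h | ⟨h, hl⟩
                               · exact Or.inl (by omega)
                               · exact Or.inr ⟨by omega, hl⟩⟩
  | cons x R ih =>
    intro P best cur bestCnt curCnt hpw hcm hcmax hcc hbm hbc hspec
    rw [List.foldl_cons]
    have hPR : ∀ p ∈ P, ∀ q ∈ (x :: R), p ≤ q :=
      (List.pairwise_append.mp hpw).2.2
    have hcx : cur ≤ x := hPR cur hcm x List.mem_cons_self
    have hpw' : ((P ++ [x]) ++ R).Pairwise (· ≤ ·) := by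
      rw [List.append_assoc]; exact hpw
    have hgoal : P ++ x :: R = (P ++ [x]) ++ R := by simp
    have hcount' : ∀ y, (P ++ [x]).count y = P.count y + (if y = x then 1 else 0) := by
      intro y
      by_cases h : y = x
      · subst h; simp [List.count_append]
      · rw [List.count_append, show List.count y [x] = 0 from
          List.count_eq_zero_of_not_mem (by simp [h]), if_neg h]
    have hbpos : 0 < P.count best := List.count_pos_iff.mpr hbm
    by_cases hxc : x = cur
    · subst hxc
      have hstep_cnt : (P ++ [x]).count x = curCnt + 1 := by
        rw [hcount' x, if_pos rfl, hcc]
      by_cases hup : bestCnt < curCnt + 1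
      · have hst : pvRunStep (best, bestCnt, x, curCnt) x
            = (x, curCnt + 1, x, curCnt + 1) := by
          simp [pvRunStep, hup]
        rw [hst, hgoal]
        apply ih (P ++ [x]) x x (curCnt + 1) (curCnt + 1) hpw'
          (List.mem_append_right _ List.mem_cons_self)
          (fun y hy => by
            rcases List.mem_append.mp hy with hy | hy
            · exact hcmax y hy
            · simp at hy; exact le_of_eq hy)
          hstep_cnt.symm
          (List.mem_append_right _ List.mem_cons_self)
          hstep_cnt.symm
        intro y hy
        rcases List.mem_append.mp hy with hy | hy
        · by_cases hyx : y = x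
          · subst hyx; exact Or.inr ⟨hstep_cnt, le_refl _⟩
          · rw [hcount' y, if_neg hyx]
            rcases hspec y hy with h | ⟨h, _⟩
            · exact Or.inl (by omega)
            · exact Or.inl (by omega)
        · simp at hy; subst hy; exact Or.inr ⟨hstep_cnt, le_refl _⟩
      · have hbne : best ≠ x := by
          intro hbe; subst hbe; omega
        have hst : pvRunStep (best, bestCnt, x, curCnt) x
            = (best, bestCnt, x, curCnt + 1) := by
          simp [pvRunStep, hup]
        rw [hst, hgoal]
        apply ih (P ++ [x]) best x bestCnt (curCnt + 1) hpw'
          (List.mem_append_right _ List.mem_cons_self)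
          (fun y hy => by
            rcases List.mem_append.mp hy with hy | hy
            · exact hcmax y hy
            · simp at hy; exact le_of_eq hy)
          hstep_cnt.symm
          (List.mem_append_left _ hbm)
          (by rw [hcount' best, if_neg hbne]; omega)
        intro y hy
        rcases List.mem_append.mp hy with hy | hy
        · by_cases hyx : y = x
          · subst hyx
            rw [hstep_cnt]
            rcases Nat.lt_or_ge (curCnt + 1) bestCnt with h | h
            · exact Or.inl h
            · exact Or.inr ⟨by omega, hcmax best hbm⟩
          · rw [hcount' y, if_neg hyx]
            simpa using hspec y hy
        · simp at hy; subst hy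
          rw [hstep_cnt]
          rcases Nat.lt_or_ge (curCnt + 1) bestCnt with h | h
          · exact Or.inl h
          · exact Or.inr ⟨by omega, hcmax best hbm⟩
    · have hxP : x ∉ P := fun hmem => hxc (le_antisymm (hcmax x hmem) hcx)
      have hstep_cnt : (P ++ [x]).count x = 1 := by
        rw [hcount' x, if_pos rfl, List.count_eq_zero_of_not_mem hxP]
      have hbnex : best ≠ x := fun hbe => hxP (hbe ▸ hbm)
      have hmax' : ∀ y ∈ P ++ [x], y ≤ x := fun y hy => by
        rcases List.mem_append.mp hy with hy | hy
        · exact le_trans (hcmax y hy) hcx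
        · simp at hy; exact le_of_eq hy
      by_cases hup : bestCnt < 1
      · exfalso; omega
      · have hst : pvRunStep (best, bestCnt, cur, curCnt) x
            = (best, bestCnt, x, 1) := by
          simp [pvRunStep, hxc, hup]
        rw [hst, hgoal]
        apply ih (P ++ [x]) best x bestCnt 1 hpw'
          (List.mem_append_right _ List.mem_cons_self)
          hmax'
          hstep_cnt.symm
          (List.mem_append_left _ hbm)
          (by rw [hcount' best, if_neg hbnex]; omega)
        intro y hy
        rcases List.mem_append.mp hy with hy | hy
        · by_cases hyx : y = x
          · exact absurd (hyx ▸ hy) hxP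
          · rw [hcount' y, if_neg hyx]
            simpa using hspec y hy
        · simp at hy; subst hy
          rw [hstep_cnt]
          rcases Nat.lt_or_ge 1 bestCnt with h | h
          · exact Or.inl h
          · exact Or.inr ⟨by omega, le_trans (hcmax best hbm) hcx⟩

lemma pvBestA_isBest (labels : PySem.Dict String String) (nbs : List String)
    (h : nbs ≠ []) :
    pvIsBest (nbs.map fun nb => labels.getD nb "") (pvBestA labels nbs) := by
  set lab : String → String := fun nb => labels.getD nb "" with hlab
  set L : List String := nbs.map lab with hL
  set counts : PySem.Dict String Int :=
    nbs.foldl (fun d nb => d.modify (lab nb) 0 (· + 1)) PySem.Dict.empty with hcounts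
  have hkeys : counts.keys = PySem.Set.ofList L := by
    rw [hcounts, PySem.Dict.keys_foldl_modify_key nbs lab 0 (fun _ _ v => v + 1) PySem.Dict.empty]
    rw [PySem.Set.ofList_eq_foldl]
    rfl
  have hcnt : ∀ v, counts.getD v 0 = (L.count v : Int) := by
    intro v
    rw [hcounts, ← List.foldl_map (f := lab)
      (g := fun (d : PySem.Dict String Int) x => d.modify x 0 (· + 1))]
    simpa using PySem.Dict.getD_foldl_modify_add_one L PySem.Dict.empty v
  have hLne : L ≠ [] := by
    rw [hL]; simpa using h
  have hkne : counts.keys ≠ [] := by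
    rw [hkeys]
    cases hLc : L with
    | nil => exact absurd hLc hLne
    | cons a t =>
      intro hnil
      have : a ∈ PySem.Set.ofList L := (PySem.Set.mem_ofList L a).mpr (by rw [hLc]; simp)
      rw [hLc, hnil] at this
      simp at this
  obtain ⟨m, hm⟩ := pv_min2_isSome (fun lbl => -(counts.getD lbl 0)) counts.keys hkne
  obtain ⟨hmem, hall⟩ := pv_min2_spec _ _ _ hm
  have hbest : pvBestA labels nbs = m := by
    show (PySem.List.min2? counts.keys (fun lbl => -(counts.getD lbl 0)) (fun lbl => lbl)).getD "" = m
    rw [hm]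
    rfl
  rw [hbest]
  constructor
  · exact (PySem.Set.mem_ofList L m).mp (hkeys ▸ hmem)
  · intro y hy
    have hyk : y ∈ counts.keys := hkeys ▸ (PySem.Set.mem_ofList L y).mpr hy
    rcases hall y hyk with hlt | ⟨heq, hle⟩
    · have hlt' : -(counts.getD m 0) < -(counts.getD y 0) := hlt
      rw [hcnt m, hcnt y] at hlt'
      exact Or.inl (by omega)
    · have heq' : -(counts.getD m 0) = -(counts.getD y 0) := heq
      rw [hcnt m, hcnt y] at heq'
      exact Or.inr ⟨by omega, hle⟩

lemma pvIsBest_perm {L L' : List String} {r : String} (hp : L.Perm L')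
    (h : pvIsBest L r) : pvIsBest L' r := by
  obtain ⟨hm, hs⟩ := h
  refine ⟨hp.mem_iff.mp hm, fun y hy => ?_⟩
  rw [← hp.count_eq y, ← hp.count_eq r]
  exact hs y (hp.mem_iff.mpr hy)

lemma pvBestB_isBest (labels : PySem.Dict String String) (nbs : List String)
    (h : nbs ≠ []) :
    pvIsBest (nbs.map fun nb => labels.getD nb "") (pvBestB labels nbs) := by
  set L : List String := nbs.map fun nb => labels.getD nb "" with hL
  have hLne : L ≠ [] := by rw [hL]; simpa using h
  cases hS : PySem.List.sorted L (fun x => x) false with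
  | nil => exact absurd ((PySem.List.sorted_eq_nil_iff L _ false).mp hS) hLne
  | cons hd t =>
    have hperm : (hd :: t).Perm L := hS ▸ PySem.List.sorted_perm L (fun x => x) false
    have hpw : (([hd] ++ t)).Pairwise (· ≤ ·) := by
      have := PySem.List.sorted_pairwise L (fun x => x)
      rw [hS] at this
      simpa using this
    have hbest : pvBestB labels nbs = (t.foldl pvRunStep (hd, 1, hd, 1)).1 := by
      unfold pvBestB
      rw [← hL, hS]
    rw [hbest]
    refine pvIsBest_perm (L := [hd] ++ t) (by simpa using hperm) ?_
    apply pv_scan t [hd] hd hd 1 1 hpw (by simp) (by simp) (by simp) (by simp) (by simp)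
    intro y hy
    simp at hy
    subst hy
    exact Or.inr ⟨by simp, le_refl _⟩

lemma pv_best_eq (labels : PySem.Dict String String) (nbs : List String)
    (h : nbs ≠ []) : pvBestA labels nbs = pvBestB labels nbs :=
  pvIsBest_unique (pvBestA_isBest labels nbs h) (pvBestB_isBest labels nbs h)

lemma pv_step_eq (adj : PySem.Dict String (List String)) :
    pvStepA adj = pvStepB adj := by
  funext st node
  unfold pvStepA pvStepB
  by_cases hn : adj.getD node [] = ([] : List String)
  · simp [hn, PySem.Set.empty]
  · simp only [PySem.Set.empty, if_neg hn, pv_best_eq st.1 _ hn]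

lemma pv_loop_eq (nodes : List String) (adj : PySem.Dict String (List String)) :
    ∀ (fuel : Nat) (labels : PySem.Dict String String),
      pvLoopA nodes adj fuel labels = pvLoopB nodes adj fuel labels := by
  intro fuel
  induction fuel with
  | zero => intro labels; rfl
  | succ k ih =>
    intro labels
    simp only [pvLoopA, pvLoopB, pv_step_eq]
    split <;> simp [ih]

lemma pv_port_eq (nodes : List String) (edges : List (String × String)) :
    label_propagation_py nodes edges = label_propagation_py_alt nodes edges := by
  unfold label_propagation_py label_propagation_py_alt
  by_cases h : nodes = []
  · simp [h]
  · simp only [if_neg h]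
    exact congrArg PySem.Dict.items (pv_loop_eq nodes _ 50 _)

-- ===== VERDICT (by name: the statement is the Claim_ definition above) =====
theorem label_propagation_py_spec : Claim_equal_label_propagation_py := by
  intro nodes edges _
  unfold Spec_label_propagation_py
  exact pv_port_eq nodes edges
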